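-- pv_equiv track=rewrite | github.com/viana1jess/JCIM_hsDHODH | LSalign_BarbosaEG/LSalign_automation.py | parse_sdf_metadata
-- ===== SOURCE A (Python) =====
-- def parse_sdf_metadata(sdf_block):
--     """
--     Parses a single molecule's SDF block to extract specific metadata fields.
--     This version is restored to capture detailed annotations.
--     """
--     metadata = {
--         'Target Name': 'N/A',
--         'Article DOI': 'N/A',
--         'PubChem CID of Ligand': 'N/A',
--         'ZINC ID of Ligand': 'N/A'
--     }
--     # Get the molecule title from the first line.
--     title = sdf_block.split('\n', 1)[0].strip()
--     metadata['SDF_Title'] = title if title else 'N/A'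
--
--     # Find a field and capture the line that follows.
--     for key in metadata:
--         search_key = f"> <{key}>"
--         try:
--             # Find the line with the key, and get the line right after it.
--             lines = sdf_block.splitlines()
--             for i, line in enumerate(lines):
--                 if search_key in line:
--                     value = lines[i + 1].strip()
--                     if value:
--                         metadata[key] = value
--                     break # Move to the next key
--         except (IndexError, ValueError):
--             # This handles cases where the key is not found or is at the end of the block
--             continue
--
--     return metadata
-- ===== SOURCE B (Python) =====
-- _KEYS = ('Target Name', 'Article DOI', 'PubChem CID of Ligand',
--          'ZINC ID of Ligand', 'SDF_Title')
--
--
-- def parse_sdf_metadata(sdf_block):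
--     """Single forward pass over the lines: each still-pending key is decided at
--     its first matching header line, instead of one scan per key."""
--     title = sdf_block.split('\n', 1)[0].strip()
--     values = {k: 'N/A' for k in _KEYS[:4]}
--     values['SDF_Title'] = title if title else 'N/A'
--     lines = sdf_block.splitlines()
--     pending = list(_KEYS)
--     for i, line in enumerate(lines):
--         matched = [k for k in pending if f"> <{k}>" in line]
--         if matched:
--             nxt = lines[i + 1].strip() if i + 1 < len(lines) else ''
--             if nxt:
--                 for k in matched:
--                     values[k] = nxt
--             pending = [k for k in pending if k not in matched]
--     return values
-- ===== Notes on version B (the rewrite author's own statement) =====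
-- stated objective: simpler
-- what changed: A rescans the whole line list once per metadata key (recomputing splitlines each time, with try/except for the missing-next-line case); B splits once and makes a single forward pass over the lines, deciding every still-pending key at its first matching header line with an explicit bounds check.
import Mathlib
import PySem

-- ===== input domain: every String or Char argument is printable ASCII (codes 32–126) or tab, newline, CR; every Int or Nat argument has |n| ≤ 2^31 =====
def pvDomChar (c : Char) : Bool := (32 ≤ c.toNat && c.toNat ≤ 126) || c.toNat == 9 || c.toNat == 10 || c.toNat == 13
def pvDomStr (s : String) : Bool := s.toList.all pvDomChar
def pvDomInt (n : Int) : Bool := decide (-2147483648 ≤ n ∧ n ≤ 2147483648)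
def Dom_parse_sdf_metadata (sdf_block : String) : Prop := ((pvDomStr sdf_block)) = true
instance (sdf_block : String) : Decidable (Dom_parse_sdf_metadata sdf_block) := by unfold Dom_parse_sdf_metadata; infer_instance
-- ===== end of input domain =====

-- B replaces A's one-scan-per-key search (one pass over the line list per metadata key)
-- by a single forward pass that decides every still-pending key at its first matching
-- header line; objective: a simpler single-pass decomposition, same return value.

-- ===== PORT A =====
-- f"> <{key}>"
def pvSearchKey (key : String) : String := "> <" ++ key ++ ">"

-- sdf_block.split('\n', 1)[0].strip()  (split with a nonempty separator always returns a
-- nonempty list, so the fallback "" is unreachable)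
def pvTitleRaw (sdf_block : String) : String :=
  match PySem.Str.splitMax? sdf_block "\n" 1 with
  | some (h :: _) => PySem.Str.strip h
  | _ => ""

-- A's inner loop over `enumerate(lines)` with its try/except: returns the value to store,
-- or none when the key is never found, the next line is missing (IndexError) or blank.
def pvFindAGo (lines : List String) (key : String) : List (Int × String) → Option String
  | [] => none
  | (i, line) :: rest =>
    if PySem.Str.isIn (pvSearchKey key) line then
      match PySem.List.pyGet? lines (i + 1) with
      | some nl =>
        let value := PySem.Str.strip nl
        if value ≠ "" then some value else none
      | none => none
    else pvFindAGo lines key rest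

def parse_sdf_metadata (sdf_block : String) : List (String × String) :=
  let title := pvTitleRaw sdf_block
  let metadata : PySem.Dict String String :=
    (PySem.Dict.ofList [("Target Name", "N/A"), ("Article DOI", "N/A"),
      ("PubChem CID of Ligand", "N/A"), ("ZINC ID of Ligand", "N/A")]).insert
      "SDF_Title" (if title = "" then "N/A" else title)
  (metadata.keys.foldl (fun d key =>
      match pvFindAGo (PySem.Str.splitlines sdf_block) key
          (PySem.List.enumerate (PySem.Str.splitlines sdf_block) 0) with
      | some v => d.insert key v
      | none => d) metadata).items

-- ===== PORT B =====
def pvKeys : List String :=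
  ["Target Name", "Article DOI", "PubChem CID of Ligand", "ZINC ID of Ligand", "SDF_Title"]

-- the single forward pass of Source B: each pending key is decided at its first matching line
def pvLoopB : List String → PySem.Dict String String → List String → PySem.Dict String String
  | [], values, _ => values
  | line :: rest, values, pending =>
    let matched := pending.filter (fun k => PySem.Str.isIn (pvSearchKey k) line)
    if matched.isEmpty then pvLoopB rest values pending
    else
      let nxt := match rest.head? with
        | some nl => PySem.Str.strip nl
        | none => ""
      let values' := if nxt ≠ "" then
          matched.foldl (fun d k => d.insert k nxt) values
        else values
      pvLoopB rest values' (pending.filter (fun k => !matched.contains k))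

def parse_sdf_metadata_alt (sdf_block : String) : List (String × String) :=
  let title := pvTitleRaw sdf_block
  let values : PySem.Dict String String :=
    ((pvKeys.take 4).foldl (fun d k => d.insert k "N/A") PySem.Dict.empty).insert
      "SDF_Title" (if title = "" then "N/A" else title)
  (pvLoopB (PySem.Str.splitlines sdf_block) values pvKeys).items

-- ===== PRECONDITION & SPEC =====
def Spec_parse_sdf_metadata (sdf_block : String) (out : List (String × String)) : Prop := out = parse_sdf_metadata_alt sdf_block
instance (sdf_block : String) (out : List (String × String)) : Decidable (Spec_parse_sdf_metadata sdf_block out) := by unfold Spec_parse_sdf_metadata; infer_instance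

-- ===== CLAIM (what is proved, stated in full; the proofs are below) =====
def Claim_equal_parse_sdf_metadata : Prop := ∀ (sdf_block : String), Dom_parse_sdf_metadata sdf_block → Spec_parse_sdf_metadata sdf_block (parse_sdf_metadata sdf_block)

-- ===== LEMMAS AND PROOFS =====

-- the common kernel of both searches: the first line of the suffix containing the header
-- decides the key (the stored value is the stripped next line, when present and nonblank)
def pvScan (key : String) : List String → Option String
  | [] => none
  | line :: rest =>
    if PySem.Str.isIn (pvSearchKey key) line then
      match rest.head? with
      | some nl => if PySem.Str.strip nl ≠ "" then some (PySem.Str.strip nl) else none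
      | none => none
    else pvScan key rest

-- A's enumerate-and-index inner loop is the suffix scan pvScan
lemma pvFindAGo_eq (key : String) : ∀ (ls : List String) (n : Nat) (lines : List String),
    lines.drop n = ls →
    pvFindAGo lines key (PySem.List.enumerate ls (n : Int)) = pvScan key ls := by
  intro ls
  induction ls with
  | nil => intro n lines h; simp [PySem.List.enumerate_nil, pvFindAGo, pvScan]
  | cons line rest ih =>
    intro n lines h
    rw [PySem.List.enumerate_cons]
    have hget : PySem.List.pyGet? lines ((n : Int) + 1) = rest.head? := by
      have h1 : ((n : Int) + 1) = ((n + 1 : Nat) : Int) := by push_cast; ring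
      rw [h1, PySem.List.pyGet?_natCast, ← List.head?_drop, ← List.tail_drop, h]
      rfl
    have hdrop : lines.drop (n + 1) = rest := by
      rw [← List.tail_drop, h]; rfl
    have h2 : ((n : Int) + 1) = ((n + 1 : Nat) : Int) := by push_cast; ring
    simp only [pvFindAGo, pvScan, hget]
    rw [h2, ih (n + 1) lines hdrop]

lemma pvContains_foldl_insert (v : String) (k : String) :
    ∀ (ks : List String) (d : PySem.Dict String String), d.contains k = true →
    (ks.foldl (fun d k => d.insert k v) d).contains k = true := by
  intro ks
  induction ks with
  | nil => intro d h; simpa using h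
  | cons a ks ih =>
    intro d h
    simp only [List.foldl_cons]
    exact ih _ (by rw [PySem.Dict.contains_insert]; simp [h])

-- a loop writing the same value under every key of ks rewrites the items pointwise
lemma pvFoldl_insert_items (v : String) : ∀ (ks : List String) (d : PySem.Dict String String),
    (∀ k ∈ ks, d.contains k = true) →
    (ks.foldl (fun d k => d.insert k v) d).items
      = d.items.map (fun p => if ks.contains p.1 then (p.1, v) else p) := by
  intro ks
  induction ks with
  | nil => intro d _; simp
  | cons a ks ih =>
    intro d h
    simp only [List.foldl_cons]
    rw [ih (d.insert a v) (fun k hk => by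
      rw [PySem.Dict.contains_insert]; simp [h k (List.mem_cons_of_mem _ hk)])]
    rw [PySem.Dict.items_insert_of_contains d v (h a (List.mem_cons_self))]
    rw [List.map_map]
    refine List.map_congr_left (fun p _ => ?_)
    by_cases hpk : p.1 = a
    · subst hpk; simp
    · simp [hpk]

-- A's per-key fold (insert the scan result when it exists) rewrites the items pointwise
lemma pvFoldl_step_items (scan : String → Option String) :
    ∀ (ks : List String) (d : PySem.Dict String String),
    (∀ k ∈ ks, d.contains k = true) →
    (ks.foldl (fun d key => match scan key with
        | some v => d.insert key v
        | none => d) d).items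
      = d.items.map (fun p => if ks.contains p.1 then (p.1, (scan p.1).getD p.2) else p) := by
  intro ks
  induction ks with
  | nil => intro d _; simp
  | cons a ks ih =>
    intro d h
    simp only [List.foldl_cons]
    cases hs : scan a with
    | none =>
      rw [ih d (fun k hk => h k (List.mem_cons_of_mem _ hk))]
      refine List.map_congr_left (fun p _ => ?_)
      by_cases hpk : p.1 = a
      · subst hpk
        by_cases hm : p.1 ∈ ks <;> simp [hm, hs]
      · simp [hpk]
    | some v =>
      rw [ih (d.insert a v) (fun k hk => by
        rw [PySem.Dict.contains_insert]; simp [h k (List.mem_cons_of_mem _ hk)])]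
      rw [PySem.Dict.items_insert_of_contains d v (h a (List.mem_cons_self))]
      rw [List.map_map]
      refine List.map_congr_left (fun p _ => ?_)
      by_cases hpk : p.1 = a
      · subst hpk
        by_cases hm : p.1 ∈ ks <;> simp [hm, hs]
      · simp [hpk]

-- B's single pass also rewrites the items pointwise, with the same per-key scan result
lemma pvLoopB_items : ∀ (ls : List String) (values : PySem.Dict String String)
    (pending : List String), (∀ k ∈ pending, values.contains k = true) →
    (pvLoopB ls values pending).items
      = values.items.map (fun p =>
          if pending.contains p.1 then (p.1, (pvScan p.1 ls).getD p.2) else p) := by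
  intro ls
  induction ls with
  | nil =>
    intro values pending h
    have he : (fun p : String × String =>
        if pending.contains p.1 = true then (p.1, (pvScan p.1 []).getD p.2) else p) = id := by
      funext p; cases p; simp [pvScan]
    rw [he, List.map_id]
    rfl
  | cons line rest ih =>
    intro values pending h
    simp only [pvLoopB]
    by_cases hm : (pending.filter (fun k => PySem.Str.isIn (pvSearchKey k) line)).isEmpty
    · rw [if_pos hm, ih values pending h]
      have hnil := List.isEmpty_iff.mp hm
      refine List.map_congr_left (fun p hp => ?_)
      by_cases hP : p.1 ∈ pending
      · have hM : PySem.Chars.isIn (pvSearchKey p.1).toList line.toList = false := by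
          have := List.filter_eq_nil_iff.mp hnil p.1 hP
          simpa using this
        simp [hP, pvScan, hM]
      · simp [hP]
    · rw [if_neg hm]
      by_cases hn : (match rest.head? with
          | some nl => PySem.Str.strip nl
          | none => "") = ""
      · rw [if_neg (by simpa using hn)]
        rw [ih values _ (fun k hk => h k (List.mem_filter.mp hk).1)]
        refine List.map_congr_left (fun p hp => ?_)
        by_cases hP : p.1 ∈ pending
        · by_cases hM : PySem.Chars.isIn (pvSearchKey p.1).toList line.toList = true
          · cases hr : rest.head? with
            | none => simp [hP, pvScan, hM, hr]
            | some nl =>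
              have hs0 : PySem.Str.strip nl = "" := by rw [hr] at hn; exact hn
              simp [hP, pvScan, hM, hr, hs0]
          · simp [hP, pvScan, hM]
        · simp [hP]
      · rw [if_pos (by simpa using hn)]
        cases rest with
        | nil => simp at hn
        | cons nl rest' =>
          have hstrip : (match (nl :: rest').head? with
              | some nl => PySem.Str.strip nl
              | none => "") = PySem.Str.strip nl := rfl
          rw [hstrip] at hn ⊢
          have hsub : ∀ k ∈ pending.filter (fun k => PySem.Str.isIn (pvSearchKey k) line),
              values.contains k = true := fun k hk => h k (List.mem_filter.mp hk).1
          rw [ih _ _ (fun k hk => pvContains_foldl_insert _ _ _ _ (h k (List.mem_filter.mp hk).1))]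
          rw [pvFoldl_insert_items _ _ _ hsub, List.map_map]
          refine List.map_congr_left (fun p hp => ?_)
          by_cases hP : p.1 ∈ pending
          · by_cases hM : PySem.Chars.isIn (pvSearchKey p.1).toList line.toList = true
            · simp [hP, pvScan, hM, hn]
            · simp [hP, pvScan, hM]
          · simp [hP]

-- ===== VERDICT (by name: the statement is the Claim_ definition above) =====
theorem parse_sdf_metadata_spec : Claim_equal_parse_sdf_metadata := by
  intro sdf _
  unfold Spec_parse_sdf_metadata parse_sdf_metadata parse_sdf_metadata_alt
  simp only []
  have hstep : ∀ key, pvFindAGo (PySem.Str.splitlines sdf) key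
      (PySem.List.enumerate (PySem.Str.splitlines sdf) 0) = pvScan key (PySem.Str.splitlines sdf) := by
    intro key
    have := pvFindAGo_eq key (PySem.Str.splitlines sdf) 0 (PySem.Str.splitlines sdf) (by simp)
    simpa using this
  simp only [hstep]
  have hkeys : ((PySem.Dict.ofList [("Target Name", "N/A"), ("Article DOI", "N/A"),
      ("PubChem CID of Ligand", "N/A"), ("ZINC ID of Ligand", "N/A")]).insert
      "SDF_Title" (if pvTitleRaw sdf = "" then "N/A" else pvTitleRaw sdf)).keys = pvKeys := rfl
  rw [hkeys]
  have hd : ((pvKeys.take 4).foldl (fun d k => d.insert k "N/A") PySem.Dict.empty) =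
      PySem.Dict.ofList [("Target Name", "N/A"), ("Article DOI", "N/A"),
      ("PubChem CID of Ligand", "N/A"), ("ZINC ID of Ligand", "N/A")] := rfl
  rw [hd]
  have hcont : ∀ k ∈ pvKeys, ((PySem.Dict.ofList [("Target Name", "N/A"), ("Article DOI", "N/A"),
      ("PubChem CID of Ligand", "N/A"), ("ZINC ID of Ligand", "N/A")]).insert
      "SDF_Title" (if pvTitleRaw sdf = "" then "N/A" else pvTitleRaw sdf)).contains k = true := by
    intro k hk
    fin_cases hk <;> rfl
  rw [pvFoldl_step_items (fun key => pvScan key (PySem.Str.splitlines sdf)) pvKeys _ hcont,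
      pvLoopB_items (PySem.Str.splitlines sdf) _ pvKeys hcont]
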